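-- pv_equiv track=rewrite | github.com/NarenMasterofInfinity/Land-Surface-Temperature-Modelling | scripts/plot_multimodel_grid.py | _find_date_index
-- ===== SOURCE A (Python) =====
-- from typing import Dict, List, Optional, Sequence, Tuple
--
-- def _normalize_date_str(value: str) -> str:
--     value = value.strip()
--     digits = "".join(ch for ch in value if ch.isdigit())
--     return digits[:8] if len(digits) >= 8 else digits
--
-- def _find_date_index(values: Sequence[str], date: str) -> Optional[int]:
--     if date in values:
--         return values.index(date)
--     target = _normalize_date_str(date)
--     if not target:
--         return None
--     norm_map = [_normalize_date_str(v) for v in values]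
--     try:
--         return norm_map.index(target)
--     except ValueError:
--         return None
-- ===== SOURCE B (Python) =====
-- def _normalize_date_str(value: str) -> str:
--     value = value.strip()
--     digits = "".join(ch for ch in value if ch.isdigit())
--     return digits[:8] if len(digits) >= 8 else digits
--
-- def _find_date_index(values, date):
--     target = _normalize_date_str(date)
--     fallback_idx = None
--     for i, v in enumerate(values):
--         if v == date:
--             return i
--         if target and fallback_idx is None and _normalize_date_str(v) == target:
--             fallback_idx = i
--     return fallback_idx
-- ===== Notes on version B (the rewrite author's own statement) =====
-- stated objective: simpler
-- what changed: Replaced A's membership test + .index scan plus a full norm_map list and second .index scan with one enumerate pass that returns on an exact match and records the first normalized match in a fallback variable.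
import Mathlib
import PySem

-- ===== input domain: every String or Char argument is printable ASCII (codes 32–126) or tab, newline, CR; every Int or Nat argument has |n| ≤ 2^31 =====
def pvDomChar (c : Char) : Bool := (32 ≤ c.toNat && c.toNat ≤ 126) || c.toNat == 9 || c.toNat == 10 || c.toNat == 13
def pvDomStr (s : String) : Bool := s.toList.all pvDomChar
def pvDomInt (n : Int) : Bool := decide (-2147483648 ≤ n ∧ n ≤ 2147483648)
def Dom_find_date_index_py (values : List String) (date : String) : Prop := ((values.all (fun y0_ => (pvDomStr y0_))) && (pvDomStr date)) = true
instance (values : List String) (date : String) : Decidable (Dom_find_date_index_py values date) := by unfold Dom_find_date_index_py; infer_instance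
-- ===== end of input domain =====

-- B fuses A's membership test, .index scan, norm_map build and second .index scan into one
-- enumerate pass with a fallback variable (objective: simpler); same return value everywhere.

-- ===== PORT A =====
-- port of _normalize_date_str (shared helper of both Pythons)
def normalize_date_str_py (value : String) : String :=
  let v := PySem.Str.strip value
  let digits := v.toList.filter PySem.Chars.isdigit
  if 8 ≤ digits.length then String.ofList (digits.take 8) else String.ofList digits

def find_date_index_py (values : List String) (date : String) : Option Int :=
  if values.contains date then
    (PySem.List.index? values date).map (fun n => (n : Int))
  else
    let target := normalize_date_str_py date
    if target = "" then none
    else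
      let norm_map := values.map normalize_date_str_py
      match PySem.List.index? norm_map target with
      | some k => some (k : Int)
      | none => none

-- ===== PORT B =====
-- the enumerate loop of Source B: i is the current index, fb the fallback_idx variable
def fdiLoop (date target : String) : List String → Int → Option Int → Option Int
  | [], _, fb => fb
  | v :: rest, i, fb =>
    if v = date then some i
    else
      fdiLoop date target rest (i + 1)
        (if target ≠ "" ∧ fb = none ∧ normalize_date_str_py v = target then some i else fb)

def find_date_index_py_alt (values : List String) (date : String) : Option Int :=
  fdiLoop date (normalize_date_str_py date) values 0 none

-- ===== PRECONDITION & SPEC =====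
def Spec_find_date_index_py (values : List String) (date : String) (out : Option Int) : Prop := out = find_date_index_py_alt values date
instance (values : List String) (date : String) (out : Option Int) : Decidable (Spec_find_date_index_py values date out) := by unfold Spec_find_date_index_py; infer_instance

-- ===== CLAIM (what is proved, stated in full; the proofs are below) =====
def Claim_equal_find_date_index_py : Prop := ∀ (values : List String) (date : String), Dom_find_date_index_py values date → Spec_find_date_index_py values date (find_date_index_py values date)

-- ===== LEMMAS AND PROOFS =====

-- The loop invariant: fdiLoop's result in terms of the two index? scans of A.
theorem fdiLoop_eq (date target : String) (vs : List String) (i : Int) (fb : Option Int) :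
    fdiLoop date target vs i fb =
      match PySem.List.index? vs date with
      | some k => some (i + (k : Int))
      | none =>
        match fb with
        | some j => some j
        | none =>
          if target = "" then none
          else (PySem.List.index? (vs.map normalize_date_str_py) target).map
                 (fun k => i + (k : Int)) := by
  induction vs generalizing i fb with
  | nil =>
    simp only [fdiLoop, PySem.List.index?_eq_idxOf?, List.map_nil, List.idxOf?_nil]
    cases fb <;> simp <;> split <;> rfl
  | cons v rest ih =>
    by_cases hv : v = date
    · subst hv
      rw [fdiLoop, if_pos rfl, PySem.List.index?_cons_self]
      simp
    · rw [fdiLoop, if_neg hv, ih, PySem.List.index?_cons_of_ne rest hv]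
      cases hvd : PySem.List.index? rest date with
      | some k => simp; omega
      | none =>
        simp only [Option.map_none]
        by_cases ht : target = ""
        · simp [ht]
        · have hcons : (v :: rest).map normalize_date_str_py
              = normalize_date_str_py v :: rest.map normalize_date_str_py := rfl
          rw [hcons]
          by_cases hn : normalize_date_str_py v = target
          · cases fb with
            | some j => simp [ht, hn]
            | none =>
              have h0 : List.idxOf? target (target :: rest.map normalize_date_str_py)
                  = some 0 := by simp [List.idxOf?_cons]
              simp [ht, hn, h0]
          · rw [PySem.List.index?_cons_of_ne (rest.map normalize_date_str_py) hn]
            cases fb with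
            | some j => simp [ht]
            | none =>
              simp only [if_neg ht, hn, and_false, ne_eq, if_false]
              cases PySem.List.index? (rest.map normalize_date_str_py) target with
              | none => simp
              | some k => simp; omega

-- ===== VERDICT (by name: the statement is the Claim_ definition above) =====
theorem find_date_index_py_spec : Claim_equal_find_date_index_py := by
  intro values date _
  show find_date_index_py values date = find_date_index_py_alt values date
  unfold find_date_index_py find_date_index_py_alt
  rw [fdiLoop_eq]
  by_cases hmem : values.contains date
  · have : date ∈ values := by simpa using hmem
    rw [if_pos hmem]
    cases hidx : PySem.List.index? values date with
    | none => exact absurd ((PySem.List.index?_eq_none_iff _ _).mp hidx) (by simpa)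
    | some k => simp
  · have hnm : date ∉ values := by simpa using hmem
    have hidx : PySem.List.index? values date = none :=
      (PySem.List.index?_eq_none_iff _ _).mpr hnm
    rw [if_neg hmem, hidx]
    by_cases ht : normalize_date_str_py date = ""
    · simp [ht]
    · simp only [if_neg ht]
      cases PySem.List.index? (values.map normalize_date_str_py) (normalize_date_str_py date) with
      | none => simp
      | some k => simp
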